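-- pv_equiv track=rewrite | github.com/Aaronbradford/CompAssignmentsS22 | Python/rm_smallest.py | rm_smallest
-- ===== SOURCE A (Python) =====
-- def rm_smallest(d):
--     # Your code here!
--     if d == {}:
--         return {}
--     minimum = min(d.values())
--     keys=d.keys()
--     for key in keys:
--         if d[key] == minimum:
--             d.pop(key)
--             return d;
-- ===== SOURCE B (Python) =====
-- def rm_smallest(d):
--     # one streaming pass: hold out the current first-minimum candidate and
--     # keep the items before/after it; the candidate is simply not emitted.
--     if d == {}:
--         return {}
--     it = iter(d.items())
--     cand = next(it)
--     before, after = [], []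
--     for item in it:
--         if item[1] < cand[1]:
--             before.append(cand)
--             before.extend(after)
--             cand = item
--             after = []
--         else:
--             after.append(item)
--     return dict(before + after)
-- ===== Notes on version B (the rewrite author's own statement) =====
-- stated objective: alternative
-- what changed: B replaces A's two-stage min(d.values())-then-scan-and-pop by a single streaming pass over the items that holds out the current first-minimum candidate and maintains the segments before/after it, building the result dict directly without ever calling min or popping. Pre_ excludes association lists with duplicate keys, which do not represent any Python dict input.
import Mathlib
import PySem

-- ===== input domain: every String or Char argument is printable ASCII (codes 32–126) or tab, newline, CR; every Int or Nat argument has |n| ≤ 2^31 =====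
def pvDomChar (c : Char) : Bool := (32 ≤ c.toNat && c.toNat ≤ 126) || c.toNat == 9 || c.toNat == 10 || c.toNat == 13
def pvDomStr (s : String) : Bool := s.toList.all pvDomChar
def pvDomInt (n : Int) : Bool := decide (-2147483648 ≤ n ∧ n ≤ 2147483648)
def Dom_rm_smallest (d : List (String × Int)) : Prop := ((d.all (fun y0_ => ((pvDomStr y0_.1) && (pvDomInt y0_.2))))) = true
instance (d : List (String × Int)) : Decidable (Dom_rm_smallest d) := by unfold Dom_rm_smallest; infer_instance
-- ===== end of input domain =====

-- B replaces A's two-stage min-of-values-then-scan-and-pop by a single streaming pass that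
-- holds out the current first-minimum candidate and keeps the before/after segments, building
-- the result directly (same O(n) cost). Python A mutates its argument (pop) while B builds a
-- new dict; the equivalence proved is about the returned value.


-- ===== PORT A =====
-- the loop 'for key in keys: if d[key] == minimum: d.pop(key); return d'
-- ([] on fall-through, where Python returns None — unreachable under Pre_;
--  d[key] is getD _ 0: every scanned key is a key of d, so the default is never taken)
def rmSmallestLoopA (d : PySem.Dict String Int) (keys : List String) (minimum : Int) :
    List (String × Int) :=
  match keys with
  | [] => []
  | key :: rest =>
      if d.getD key 0 = minimum then
        match d.pop? key with
        | some p => p.2.items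
        | none => []          -- unreachable: key ∈ d.keys
      else rmSmallestLoopA d rest minimum

def rm_smallest (d : List (String × Int)) : List (String × Int) :=
  if d = [] then []
  else
    match PySem.List.min? (PySem.Dict.mk d).values (fun v => v) with
    | none => []              -- unreachable: d ≠ []
    | some minimum => rmSmallestLoopA (PySem.Dict.mk d) (PySem.Dict.mk d).keys minimum

-- ===== PORT B =====
-- the loop 'for item in it: if item[1] < cand[1]: flush cand and after into before, cand = item,
-- after = [] else: after.append(item)'; at the end 'dict(before + after)' (cand is dropped)
def rmAltLoop (before : List (String × Int)) (cand : String × Int)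
    (after : List (String × Int)) : List (String × Int) → List (String × Int)
  | [] => before ++ after
  | item :: rest =>
      if item.2 < cand.2 then rmAltLoop (before ++ [cand] ++ after) item [] rest
      else rmAltLoop before cand (after ++ [item]) rest

def rm_smallest_alt (d : List (String × Int)) : List (String × Int) :=
  if d = [] then []
  else
    match (PySem.Dict.mk d).items with
    | [] => []                -- unreachable: d ≠ []
    | cand :: rest => rmAltLoop [] cand [] rest

-- ===== PRECONDITION & SPEC =====
-- Pre_ excludes association lists with duplicate keys: they do not represent a Python dict
-- input (a dict literal collapses duplicates), so A's behaviour on them is not defined by the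
-- source; every genuine dict input is admitted.
def Pre_rm_smallest (d : List (String × Int)) : Prop := (d.map Prod.fst).Nodup
instance (d : List (String × Int)) : Decidable (Pre_rm_smallest d) := by
  unfold Pre_rm_smallest; infer_instance
def pvWitness_rm_smallest : (List (String × Int)) := [("a", 3), ("b", 1), ("c", 1)]
def Spec_rm_smallest (d : List (String × Int)) (out : List (String × Int)) : Prop := out = rm_smallest_alt d
instance (d : List (String × Int)) (out : List (String × Int)) : Decidable (Spec_rm_smallest d out) := by unfold Spec_rm_smallest; infer_instance

-- ===== CLAIM (what is proved, stated in full; the proofs are below) =====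
def Claim_equal_rm_smallest : Prop := ∀ (d : List (String × Int)), Dom_rm_smallest d → Pre_rm_smallest d → Spec_rm_smallest d (rm_smallest d)

-- ===== LEMMAS AND PROOFS =====

-- remove the first element attaining the minimum value (the common characterisation)
def efm : List (String × Int) → List (String × Int)
  | [] => []
  | x :: t => if ∀ y ∈ t, x.2 ≤ y.2 then t else x :: efm t

-- the first element attaining the minimum of `f`, as a structural recursion
def firstMin {α : Type} (f : α → Int) : List α → Option α
  | [] => none
  | a :: t =>
      match firstMin f t with
      | none => some a
      | some r => if f a ≤ f r then some a else some r

theorem firstMin_mem {α : Type} (f : α → Int) (l : List α) (r : α)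
    (h : firstMin f l = some r) : r ∈ l := by
  induction l with
  | nil => simp [firstMin] at h
  | cons a t ih =>
      simp only [firstMin] at h
      rcases ht : firstMin f t with _ | r'
      · rw [ht] at h; simp only [Option.some.injEq] at h; subst h; simp
      · rw [ht] at h; simp only [] at h
        split_ifs at h <;> simp only [Option.some.injEq] at h <;> subst h
        · simp
        · exact List.mem_cons_of_mem _ (ih ht)

theorem firstMin_isSome {α : Type} (f : α → Int) (a : α) (t : List α) :
    ∃ r, firstMin f (a :: t) = some r := by
  simp only [firstMin]
  rcases firstMin f t with _ | r
  · exact ⟨a, rfl⟩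
  · by_cases h : f a ≤ f r
    · exact ⟨a, by simp [h]⟩
    · exact ⟨r, by simp [h]⟩

theorem firstMin_eq_none {α : Type} (f : α → Int) (l : List α)
    (h : firstMin f l = none) : l = [] := by
  cases l with
  | nil => rfl
  | cons a t =>
      obtain ⟨r, hr⟩ := firstMin_isSome f a t
      rw [hr] at h; cases h

theorem firstMin_le {α : Type} (f : α → Int) (l : List α) (r : α)
    (h : firstMin f l = some r) : ∀ y ∈ l, f r ≤ f y := by
  induction l generalizing r with
  | nil => simp [firstMin] at h
  | cons a t ih =>
      intro y hy
      simp only [firstMin] at h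
      rcases ht : firstMin f t with _ | r'
      · rw [ht] at h; simp only [Option.some.injEq] at h; subst h
        rcases List.mem_cons.1 hy with hya | hyt
        · subst hya; omega
        · rw [firstMin_eq_none f t ht] at hyt; simp at hyt
      · rw [ht] at h; simp only [] at h
        rcases List.mem_cons.1 hy with hya | hyt
        · subst hya; split_ifs at h <;> simp only [Option.some.injEq] at h <;> subst h
          · omega
          · have := ih r' ht
            omega
        · have := ih r' ht y hyt
          split_ifs at h with hle <;> simp only [Option.some.injEq] at h <;> subst h
          · omega
          · exact this

theorem firstMin_congr {α : Type} (f g : α → Int) (l : List α)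
    (h : ∀ a ∈ l, f a = g a) : firstMin f l = firstMin g l := by
  induction l with
  | nil => rfl
  | cons a t ih =>
      simp only [firstMin, ih (fun x hx => h x (List.mem_cons_of_mem _ hx))]
      rcases ht : firstMin g t with _ | r
      · rfl
      · have hr : r ∈ t := firstMin_mem g t r ht
        simp only [h a (by simp), h r (List.mem_cons_of_mem _ hr)]

theorem firstMin_map_comp {α β : Type} (g : β → Int) (h : α → β) (l : List α) :
    firstMin g (l.map h) = Option.map h (firstMin (fun a => g (h a)) l) := by
  induction l with
  | nil => rfl
  | cons a t ih =>
      simp only [List.map_cons, firstMin, ih]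
      rcases firstMin (fun a => g (h a)) t with _ | r
      · rfl
      · simp only [Option.map_some]
        split_ifs <;> rfl

theorem foldl_min2_eq_firstMin {α : Type} (f : α → Int) (t : List α) :
    ∀ a : α,
      t.foldl (fun m x => if f x < f m then x else m) a =
        (match firstMin f t with
         | none => a
         | some r => if f a ≤ f r then a else r) := by
  induction t with
  | nil => intro a; simp [firstMin]
  | cons b t ih =>
      intro a
      simp only [List.foldl_cons, ih, firstMin]
      rcases h : firstMin f t with _ | r <;> simp only []
      · split_ifs <;> first | rfl | omega
      · split_ifs <;> simp only [] <;> split_ifs <;> first | rfl | omega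

theorem min?_eq_firstMin {α : Type} (f : α → Int) (l : List α) :
    PySem.List.min? l f = firstMin f l := by
  cases l with
  | nil => rfl
  | cons a t =>
      have h0 : PySem.List.min? (a :: t) f =
          t.foldl (fun m x => if f x < f m then x else m) a := by
        simp only [PySem.List.min?, List.foldl_cons]
        induction t generalizing a with
        | nil => rfl
        | cons b t ih => simp only [List.foldl_cons]; split_ifs <;> exact ih _
      rw [h0, foldl_min2_eq_firstMin]
      simp only [firstMin]
      rcases firstMin f t with _ | r <;> simp only []
      split_ifs <;> rfl

theorem min?_map_id {α : Type} (f : α → Int) (l : List α) :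
    PySem.List.min? (l.map f) (fun v => v) = Option.map f (PySem.List.min? l f) := by
  rw [min?_eq_firstMin, min?_eq_firstMin, firstMin_map_comp]

-- A's loop pops the first key attaining the minimum: it returns the erasure of that key
theorem loopA_eq (d : PySem.Dict String Int) (keys : List String) (r : String)
    (hk : ∀ k ∈ keys, k ∈ d.keys)
    (h : firstMin (fun k => d.getD k 0) keys = some r) :
    rmSmallestLoopA d keys (d.getD r 0) = (d.erase r).items := by
  induction keys with
  | nil => simp [firstMin] at h
  | cons a t ih =>
      have hmem : a ∈ d.keys := hk a (by simp)
      have hget : ∃ v, d.get? a = some v := by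
        rcases hv : d.get? a with _ | v
        · exact absurd hmem ((PySem.Dict.get?_eq_none_iff_not_mem_keys _ _).1 hv)
        · exact ⟨v, rfl⟩
      obtain ⟨v, hv⟩ := hget
      simp only [firstMin] at h
      rcases ht : firstMin (fun k => d.getD k 0) t with _ | r'
      · rw [ht] at h
        simp only [Option.some.injEq] at h
        subst h
        simp [rmSmallestLoopA, PySem.Dict.pop?, hv]
      · rw [ht] at h
        simp only [] at h
        by_cases hle : d.getD a 0 ≤ d.getD r' 0
        · simp only [hle, if_pos] at h
          simp only [Option.some.injEq] at h
          subst h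
          simp [rmSmallestLoopA, PySem.Dict.pop?, hv]
        · rw [if_neg hle] at h
          simp only [Option.some.injEq] at h
          subst h
          have hne : ¬ d.getD a 0 = d.getD r' 0 := by omega
          simp only [rmSmallestLoopA]
          rw [if_neg hne]
          exact ih (fun k hkm => hk k (by simp [hkm])) ht

theorem efm_unfold (x : String × Int) (t : List (String × Int)) :
    efm (x :: t) = if ∀ y ∈ t, x.2 ≤ y.2 then t else x :: efm t := rfl

theorem efm_cons_of_le (x : String × Int) (t : List (String × Int))
    (h : ∀ y ∈ t, x.2 ≤ y.2) : efm (x :: t) = t := by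
  rw [efm_unfold, if_pos h]

theorem efm_append_lt (z : String × Int) (l : List (String × Int)) (hz : z ∈ l)
    (p : List (String × Int)) (hp : ∀ y ∈ p, z.2 < y.2) :
    efm (p ++ l) = p ++ efm l := by
  induction p with
  | nil => simp
  | cons y p' ih =>
      have hno : ¬ ∀ w ∈ p' ++ l, y.2 ≤ w.2 := by
        intro hall
        have := hall z (List.mem_append_right _ hz)
        have := hp y (by simp)
        omega
      rw [List.cons_append, efm_unfold, if_neg hno]
      rw [ih (fun w hw => hp w (List.mem_cons_of_mem _ hw))]
      rfl

-- B's streaming loop computes before ++ (first-min removed from cand :: after ++ l)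
theorem loopB_eq (l : List (String × Int)) :
    ∀ (before : List (String × Int)) (c : String × Int) (after : List (String × Int)),
      (∀ y ∈ after, c.2 ≤ y.2) →
      rmAltLoop before c after l = before ++ efm (c :: (after ++ l)) := by
  induction l with
  | nil =>
      intro before c after h
      simp only [rmAltLoop, List.append_nil]
      rw [efm_cons_of_le c after h]
  | cons z rest ih =>
      intro before c after h
      simp only [rmAltLoop]
      by_cases hz : z.2 < c.2
      · rw [if_pos hz, ih _ z [] (by simp)]
        have hno : ¬ ∀ w ∈ after ++ z :: rest, c.2 ≤ w.2 := by
          intro hall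
          have := hall z (List.mem_append_right _ (by simp))
          omega
        have hlt : ∀ y ∈ after, z.2 < y.2 := fun y hy => by have := h y hy; omega
        have hrhs : efm (c :: (after ++ z :: rest)) = c :: (after ++ efm (z :: rest)) := by
          rw [efm_unfold, if_neg hno, efm_append_lt z (z :: rest) (by simp) after hlt]
        rw [hrhs]
        simp [List.append_assoc]
      · rw [if_neg hz]
        have h' : ∀ y ∈ after ++ [z], c.2 ≤ y.2 := by
          intro y hy
          rcases List.mem_append.1 hy with hy1 | hy2
          · exact h y hy1
          · simp at hy2; subst hy2; omega
        rw [ih before c (after ++ [z]) h']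
        simp

-- with nodup keys, erasing the first-min key from the dict removes exactly the first-min pair
theorem filter_eq_erase (d : List (String × Int)) (fm : String × Int)
    (hnd : (d.map Prod.fst).Nodup) (hm : fm ∈ d) :
    d.filter (fun p => !(p.1 == fm.1)) = d.erase fm := by
  induction d with
  | nil => simp at hm
  | cons x t ih =>
      simp only [List.map_cons, List.nodup_cons] at hnd
      by_cases hx : x = fm
      · subst hx
        have hkeep : ∀ p ∈ t, (!(p.1 == x.1)) = true := by
          intro p hp
          have : p.1 ∈ t.map Prod.fst := List.mem_map_of_mem hp
          simp only [Bool.not_eq_true', beq_eq_false_iff_ne, ne_eq]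
          intro hpe; exact hnd.1 (hpe ▸ this)
        rw [List.filter_cons_of_neg (by simp), List.filter_eq_self.2 hkeep,
          List.erase_cons_head]
      · have hmt : fm ∈ t := by rcases List.mem_cons.1 hm with h1 | h2; exact absurd h1.symm hx; exact h2
        have hne : x.1 ≠ fm.1 := by
          intro he
          exact hnd.1 (he ▸ List.mem_map_of_mem hmt)
        have hxb : (!(x.1 == fm.1)) = true := by simp [hne]
        rw [List.filter_cons, if_pos hxb, List.erase_cons_tail (by simp; intro h; exact hx h)]
        rw [ih hnd.2 hmt]

-- efm removes the first pair attaining the minimum value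
theorem efm_eq_erase (d : List (String × Int)) (fm : String × Int)
    (h : firstMin (fun p => p.2) d = some fm) : efm d = d.erase fm := by
  induction d with
  | nil => simp [firstMin] at h
  | cons x t ih =>
      simp only [firstMin] at h
      rcases ht : firstMin (fun p => p.2) t with _ | r
      · rw [ht] at h; simp only [Option.some.injEq] at h; subst h
        have hall : ∀ y ∈ t, x.2 ≤ y.2 := by
          intro y hy
          rw [firstMin_eq_none _ t ht] at hy; simp at hy
        rw [efm_cons_of_le x t hall, List.erase_cons_head]
      · rw [ht] at h; simp only [] at h
        by_cases hle : x.2 ≤ r.2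
        · rw [if_pos hle] at h; simp only [Option.some.injEq] at h; subst h
          have hall : ∀ y ∈ t, x.2 ≤ y.2 := fun y hy => le_trans hle (firstMin_le _ t r ht y hy)
          rw [efm_cons_of_le x t hall, List.erase_cons_head]
        · rw [if_neg hle] at h; simp only [Option.some.injEq] at h; subst h
          have hno : ¬ ∀ y ∈ t, x.2 ≤ y.2 := by
            intro hall
            exact hle (hall r (firstMin_mem _ t r ht))
          have hxne : x ≠ r := by
            intro he
            rw [he] at hle
            exact hle le_rfl
          rw [efm_unfold, if_neg hno]
          rw [List.erase_cons_tail (by simp; exact hxne), ih ht]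

-- ===== VERDICT (by name: the statement is the Claim_ definition above) =====
theorem rm_smallest_spec : Claim_equal_rm_smallest := by
  intro d _ hpre
  unfold Spec_rm_smallest
  by_cases hd : d = []
  · simp [rm_smallest, rm_smallest_alt, hd]
  · have hkeys : (PySem.Dict.mk d).keys = d.map Prod.fst := rfl
    obtain ⟨p, t, hdd⟩ := List.exists_cons_of_ne_nil hd
    -- the element-level first minimum
    have hfm : ∃ fm, firstMin (fun q : String × Int => q.2) d = some fm := by
      rw [hdd]; exact firstMin_isSome _ p t
    obtain ⟨fm, hfm⟩ := hfm
    -- key-level first minimum equals fm's key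
    have hF1 : firstMin (fun k => (PySem.Dict.mk d).getD k 0) (d.map Prod.fst)
        = some fm.1 := by
      rw [firstMin_map_comp]
      rw [firstMin_congr (fun a : String × Int => (PySem.Dict.mk d).getD a.1 0)
            (fun a : String × Int => a.2) d
            (fun a ha =>
              PySem.Dict.getD_of_mem_items (PySem.Dict.mk d) (k := a.1) (v := a.2)
                (by simpa using ha) hpre 0)]
      rw [hfm]; rfl
    have hrk : firstMin (fun k => (PySem.Dict.mk d).getD k 0) (PySem.Dict.mk d).keys
        = some fm.1 := by rw [hkeys]; exact hF1
    have hminB : PySem.List.min? (PySem.Dict.mk d).keys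
        (fun k => (PySem.Dict.mk d).getD k 0) = some fm.1 := by
      rw [min?_eq_firstMin]; exact hrk
    have hvals : (PySem.Dict.mk d).values
        = (PySem.Dict.mk d).keys.map (fun k => (PySem.Dict.mk d).getD k 0) :=
      PySem.Dict.values_eq_map_keys _ hpre 0
    have hminA : PySem.List.min? (PySem.Dict.mk d).values (fun v => v)
        = some ((PySem.Dict.mk d).getD fm.1 0) := by
      rw [hvals, min?_map_id, hminB]; rfl
    -- A's side: erase the first-min key
    have hA : rm_smallest d = ((PySem.Dict.mk d).erase fm.1).items := by
      rw [rm_smallest, if_neg hd, hminA]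
      exact loopA_eq (PySem.Dict.mk d) (PySem.Dict.mk d).keys fm.1 (fun k hk => hk) hrk
    -- B's side: the streaming pass computes efm
    have hB : rm_smallest_alt d = efm d := by
      rw [rm_smallest_alt, if_neg hd]
      conv_lhs => rw [hdd]
      show rmAltLoop [] p [] t = efm d
      rw [loopB_eq t [] p [] (by simp), hdd]
      simp
    rw [hA, hB]
    have hfil : ((PySem.Dict.mk d).erase fm.1).items
        = d.filter (fun p => !(p.1 == fm.1)) := rfl
    rw [hfil, filter_eq_erase d fm hpre (firstMin_mem _ d fm hfm), efm_eq_erase d fm hfm]
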